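-- pv_equiv track=rewrite | github.com/yohannesalex/compititive-repository | week2/minimum-number-of-operations-to-move-all-balls-to-each-box.py | minOperations
-- ===== SOURCE A (Python) =====
-- from typing import List
--
-- def minOperations(boxes: str) -> List[int]:
--     res=[]
--
--     for i in range(len(boxes)):
--         cur=0
--         l=0
--         while l < len(boxes):
--
--             if boxes[l]=="1":
--                 cur+=abs(l-i)
--             l+=1
--         res.append(cur)
--         cur=0
--     return res
-- ===== SOURCE B (Python) =====
-- from typing import List
--
-- def minOperations(boxes: str) -> List[int]:
--     # One O(n) forward sweep: compute total ones and cost at index 0, then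
--     # update with the recurrence cost(i+1) = cost(i) + ones_left - ones_right.
--     total = 0
--     cost0 = 0
--     for l, ch in enumerate(boxes):
--         if ch == "1":
--             total += 1
--             cost0 += l
--     res = []
--     cur = cost0
--     cnt = 0
--     for ch in boxes:
--         res.append(cur)
--         cnt += ch == "1"
--         cur += cnt - (total - cnt)
--     return res
-- ===== Notes on version B (the rewrite author's own statement) =====
-- stated objective: faster
-- what changed: Replaces the per-index full rescan (nested loops) by one counting pass plus a single forward sweep using the recurrence cost(i+1) = cost(i) + ones_on_left - ones_on_right.
import Mathlib
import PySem

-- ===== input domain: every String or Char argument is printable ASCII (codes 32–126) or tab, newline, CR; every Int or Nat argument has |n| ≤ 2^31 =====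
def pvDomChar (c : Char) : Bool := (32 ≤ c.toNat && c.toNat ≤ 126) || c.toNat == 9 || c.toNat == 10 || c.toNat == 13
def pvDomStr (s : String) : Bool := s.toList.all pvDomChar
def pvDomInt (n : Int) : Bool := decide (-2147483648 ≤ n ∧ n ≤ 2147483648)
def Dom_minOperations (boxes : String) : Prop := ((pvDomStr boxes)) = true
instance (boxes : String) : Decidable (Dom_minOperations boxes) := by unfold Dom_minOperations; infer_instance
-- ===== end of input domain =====

-- B replaces A's quadratic per-index rescan by one counting pass and one
-- forward sweep using cost(i+1) = cost(i) + ones_left - ones_right (O(n)).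

-- ===== PORT A =====
-- for i in range(len(boxes)): inner while scans every l, adding abs(l-i) for '1' boxes
def minOperations (boxes : String) : List Int :=
  let n : Int := PySem.Str.len boxes
  (PySem.List.pyRange 0 n 1).foldl
    (fun res i =>
      let cur := (PySem.List.pyRange 0 n 1).foldl
        (fun cur l => if PySem.Str.pyGet? boxes l = some '1' then cur + |l - i| else cur) 0
      res ++ [cur]) []

-- ===== PORT B =====
def minOperations_alt (boxes : String) : List Int :=
  let cs := boxes.toList
  -- first pass: total ones and cost at index 0
  let tc := (PySem.List.enumerate cs 0).foldl
      (fun (st : Int × Int) p => if p.2 = '1' then (st.1 + 1, st.2 + p.1) else st) (0, 0)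
  -- second pass: emit cur, then update cnt and cur
  let r := cs.foldl
      (fun (st : List Int × Int × Int) ch =>
        let cnt' := st.2.2 + (if ch = '1' then 1 else 0)
        (st.1 ++ [st.2.1], st.2.1 + (cnt' - (tc.1 - cnt')), cnt'))
      ([], tc.2, 0)
  r.1

-- ===== PRECONDITION & SPEC =====
def Spec_minOperations (boxes : String) (out : List Int) : Prop := out = minOperations_alt boxes
instance (boxes : String) (out : List Int) : Decidable (Spec_minOperations boxes out) := by unfold Spec_minOperations; infer_instance

-- ===== CLAIM (what is proved, stated in full; the proofs are below) =====
def Claim_equal_minOperations : Prop := ∀ (boxes : String), Dom_minOperations boxes → Spec_minOperations boxes (minOperations boxes)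

-- ===== LEMMAS AND PROOFS =====

-- a '1'-indicator for position l of cs
def pvB (cs : List Char) (l : Nat) : Int := if cs[l]? = some '1' then 1 else 0

-- Σ_l b_l * |l - i|  : the number of operations to move all balls to box i
def pvCost (cs : List Char) (i : Nat) : Int :=
  ∑ l ∈ Finset.range cs.length, pvB cs l * (((l : Int) - (i : Int)).natAbs : Int)

-- number of ones at positions < i
def pvCnt (cs : List Char) (i : Nat) : Int :=
  ∑ l ∈ Finset.range cs.length, pvB cs l * (if l < i then 1 else 0)

def pvTotal (cs : List Char) : Int := ∑ l ∈ Finset.range cs.length, pvB cs l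

-- A's inner while-loop computes pvCost
lemma pvA_inner (cs : List Char) (i : Nat) (m : Nat) :
    (List.range m).foldl
      (fun (cur : Int) (k : Nat) => if cs[k]? = some '1' then cur + |(k : Int) - (i : Int)| else cur) 0
      = ∑ l ∈ Finset.range m, pvB cs l * (((l : Int) - (i : Int)).natAbs : Int) := by
  induction m with
  | zero => simp
  | succ m ih =>
    rw [List.range_succ, List.foldl_append, Finset.sum_range_succ, ih]
    simp only [List.foldl_cons, List.foldl_nil, pvB]
    rw [Int.abs_eq_natAbs]
    split_ifs with h <;> simp

-- A's port equals the map of pvCost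
lemma pvA_eq (boxes : String) :
    minOperations boxes = (List.range boxes.toList.length).map (fun k => pvCost boxes.toList k) := by
  unfold minOperations
  dsimp only
  rw [PySem.Str.len_eq, PySem.List.pyRange_one]
  simp only [Int.sub_zero, Int.toNat_natCast, List.foldl_map, zero_add]
  rw [PySem.List.foldl_append_singleton_eq_map]
  simp only [List.nil_append]
  refine List.map_congr_left (fun i hi => ?_)
  simp only [PySem.Str.pyGet?_natCast]
  rw [pvA_inner boxes.toList i boxes.toList.length]
  rfl

-- B's first pass
lemma pvPass1 (cs : List Char) : ∀ (s a b : Int),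
    (PySem.List.enumerate cs s).foldl
      (fun (st : Int × Int) p => if p.2 = '1' then (st.1 + 1, st.2 + p.1) else st) (a, b)
      = (a + pvTotal cs, b + ∑ l ∈ Finset.range cs.length, pvB cs l * (s + l)) := by
  induction cs with
  | nil => simp [pvTotal]
  | cons c t ih =>
    intro s a b
    rw [PySem.List.enumerate_cons, List.foldl_cons]
    have hB0 : pvB (c :: t) 0 = if c = '1' then 1 else 0 := by simp [pvB]
    have hBs : ∀ l : Nat, pvB (c :: t) (l + 1) = pvB t l := by intro l; simp [pvB]
    have htot : pvTotal (c :: t) = (if c = '1' then 1 else 0) + pvTotal t := by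
      simp only [pvTotal, List.length_cons, Finset.sum_range_succ', hB0, hBs]
      ring
    have hs : (∑ x ∈ Finset.range t.length, pvB t x * (s + (↑(x + 1) : Int)))
        = ∑ x ∈ Finset.range t.length, pvB t x * (s + 1 + (x : Int)) :=
      Finset.sum_congr rfl (fun l _ => by push_cast; ring)
    by_cases hc : c = '1'
    · rw [if_pos (show (s, c).2 = '1' from hc), ih]
      simp only [Prod.mk.injEq, List.length_cons,
        Finset.sum_range_succ' (fun l => pvB (c :: t) l * (s + (l : Int))), hBs, hB0, hs,
        if_pos hc, htot]
      constructor <;> push_cast <;> ring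
    · rw [if_neg (show ¬ (s, c).2 = '1' from hc), ih]
      simp only [Prod.mk.injEq, List.length_cons,
        Finset.sum_range_succ' (fun l => pvB (c :: t) l * (s + (l : Int))), hBs, hB0, hs,
        if_neg hc, htot]
      constructor <;> push_cast <;> ring

lemma pvCnt_zero (cs : List Char) : pvCnt cs 0 = 0 := by simp [pvCnt]

lemma pvCnt_succ (cs : List Char) (i : Nat) :
    pvCnt cs (i + 1) = pvCnt cs i + pvB cs i := by
  unfold pvCnt
  rw [Finset.sum_congr rfl (fun l _ => by split_ifs <;> simp <;> omega :
    ∀ l ∈ Finset.range cs.length, pvB cs l * (if l < i + 1 then 1 else 0)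
      = pvB cs l * (if l < i then 1 else 0) + (if l = i then pvB cs l else 0)),
    Finset.sum_add_distrib, Finset.sum_ite_eq' (Finset.range cs.length) i (fun l => pvB cs l)]
  by_cases hi : i < cs.length
  · simp [hi]
  · have h0 : pvB cs i = 0 := by
      unfold pvB
      rw [List.getElem?_eq_none (by omega)]
      simp
    simp [hi, h0]

lemma pvCost_succ (cs : List Char) (i : Nat) :
    pvCost cs (i + 1)
      = pvCost cs i + (pvCnt cs (i + 1) - (pvTotal cs - pvCnt cs (i + 1))) := by
  unfold pvCost pvCnt pvTotal
  have hpt : ∀ l ∈ Finset.range cs.length,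
      pvB cs l * (((l : Int) - ((i + 1 : Nat) : Int)).natAbs : Int)
        = pvB cs l * (((l : Int) - (i : Int)).natAbs : Int)
          + (2 * (pvB cs l * (if l < i + 1 then 1 else 0)) - pvB cs l) := by
    intro l _
    unfold pvB
    split_ifs <;> simp only [one_mul, mul_one, zero_mul, mul_zero, add_zero, zero_sub,
      sub_self] <;> omega
  rw [Finset.sum_congr rfl hpt, Finset.sum_add_distrib, Finset.sum_sub_distrib, ← Finset.mul_sum]
  ring

-- B's second pass, generalized over the suffix still to be processed
lemma pvPass2 (cs : List Char) (t : List Char) (i : Nat) (acc : List Int)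
    (hdrop : cs.drop i = t) :
    (t.foldl
      (fun (st : List Int × Int × Int) ch =>
        let cnt' := st.2.2 + (if ch = '1' then 1 else 0)
        (st.1 ++ [st.2.1], st.2.1 + (cnt' - (pvTotal cs - cnt')), cnt'))
      (acc, pvCost cs i, pvCnt cs i)).1
      = acc ++ (List.range t.length).map (fun k => pvCost cs (i + k)) := by
  induction t generalizing i acc with
  | nil => simp
  | cons c t' ih =>
    have hc : cs[i]? = some c := by
      have h1 : (cs.drop i)[0]? = some c := by rw [hdrop]; rfl
      rwa [List.getElem?_drop, Nat.add_zero] at h1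
    have hdrop' : cs.drop (i + 1) = t' := by
      have h1 : (cs.drop i).drop 1 = t' := by rw [hdrop]; rfl
      rw [List.drop_drop] at h1
      simpa [Nat.add_comm] using h1
    have hbi : (if c = '1' then (1 : Int) else 0) = pvB cs i := by
      unfold pvB; rw [hc]
      rcases eq_or_ne c '1' with h | h <;> simp [h]
    rw [List.foldl_cons]
    dsimp only
    rw [hbi, ← pvCnt_succ, ← pvCost_succ]
    rw [ih (i + 1) (acc ++ [pvCost cs i]) hdrop']
    rw [List.length_cons, List.range_succ_eq_map, List.map_cons, List.map_map, List.append_assoc]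
    simp only [Nat.add_zero, List.cons_append]
    congr 2
    rw [List.nil_append]
    refine List.map_congr_left (fun k _ => ?_)
    simp only [Function.comp_apply]
    congr 1
    omega

lemma pvB_eq (boxes : String) :
    minOperations_alt boxes = (List.range boxes.toList.length).map (fun k => pvCost boxes.toList k) := by
  unfold minOperations_alt
  dsimp only
  rw [pvPass1]
  have hc0 : (0 : Int) + ∑ l ∈ Finset.range boxes.toList.length, pvB boxes.toList l * (0 + (l : Int))
      = pvCost boxes.toList 0 := by
    unfold pvCost
    rw [zero_add]
    exact Finset.sum_congr rfl (fun l _ => by simp)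
  rw [hc0]
  have := pvPass2 boxes.toList boxes.toList 0 [] (by simp)
  rw [pvCnt_zero] at this
  simp only [zero_add] at this ⊢
  rw [this]
  simp

-- ===== VERDICT (by name: the statement is the Claim_ definition above) =====
theorem minOperations_spec : Claim_equal_minOperations := by
  intro boxes _
  unfold Spec_minOperations
  rw [pvA_eq, pvB_eq]
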